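-- pv_equiv track=rewrite | github.com/lee101/stock-prediction | binance_worksteal/trade_live.py | _diagnose_follow_up_base_argv
-- ===== SOURCE A (Python) =====
-- def _diagnose_follow_up_base_argv(raw_argv: list[str] | None) -> list[str]:
--     if not raw_argv:
--         return []
--     stripped: list[str] = []
--     value_flags = {"--summary-json", "--max-symbols", "--universe-file"}
--     mode_flags = {"--diagnose", "--preview-run", "--list-symbols"}
--     index = 0
--     while index < len(raw_argv):
--         arg = str(raw_argv[index])
--         if arg in mode_flags:
--             index += 1
--             continue
--         if arg in value_flags:
--             index += 2
--             continue
--         if arg == "--symbols":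
--             index += 1
--             while index < len(raw_argv) and not str(raw_argv[index]).startswith("-"):
--                 index += 1
--             continue
--         stripped.append(arg)
--         index += 1
--     return stripped
-- ===== SOURCE B (Python) =====
-- def _diagnose_follow_up_base_argv(raw_argv):
--     if not raw_argv:
--         return []
--     value_flags = {"--summary-json", "--max-symbols", "--universe-file"}
--     mode_flags = {"--diagnose", "--preview-run", "--list-symbols"}
--     stripped = []
--     skip_next = 0
--     skipping_symbols = False
--     for raw in raw_argv:
--         arg = str(raw)
--         if skip_next:
--             skip_next -= 1
--             continue
--         if skipping_symbols:
--             if not arg.startswith("-"):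
--                 continue
--             skipping_symbols = False
--         if arg in mode_flags:
--             continue
--         if arg in value_flags:
--             skip_next = 1
--             continue
--         if arg == "--symbols":
--             skipping_symbols = True
--             continue
--         stripped.append(arg)
--     return stripped
-- ===== Notes on version B (the rewrite author's own statement) =====
-- stated objective: alternative
-- what changed: Replaced the index-stepping while loop with a nested inner while for --symbols runs by a single forward for-loop over the elements carrying explicit state (a skip_next counter for value flags and a skipping_symbols boolean), so there is no index arithmetic and no inner loop.
import Mathlib
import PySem

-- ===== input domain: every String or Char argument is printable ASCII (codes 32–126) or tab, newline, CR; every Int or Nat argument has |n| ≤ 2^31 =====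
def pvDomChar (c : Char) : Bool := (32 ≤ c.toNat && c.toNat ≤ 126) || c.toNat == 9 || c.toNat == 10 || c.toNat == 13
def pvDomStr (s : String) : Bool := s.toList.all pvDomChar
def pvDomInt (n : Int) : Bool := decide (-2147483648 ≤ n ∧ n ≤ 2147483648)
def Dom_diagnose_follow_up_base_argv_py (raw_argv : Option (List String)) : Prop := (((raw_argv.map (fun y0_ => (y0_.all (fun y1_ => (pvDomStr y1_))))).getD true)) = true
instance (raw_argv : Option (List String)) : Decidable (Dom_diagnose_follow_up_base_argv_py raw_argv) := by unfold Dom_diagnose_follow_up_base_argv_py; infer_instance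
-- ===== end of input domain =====

-- B replaces A's index-stepping while loop (with a nested inner while for --symbols runs)
-- by one forward pass carrying explicit skip_next / skipping_symbols state; same cost.

-- ===== PORT A =====
def pvValueFlags : List String := ["--summary-json", "--max-symbols", "--universe-file"]
def pvModeFlags : List String := ["--diagnose", "--preview-run", "--list-symbols"]

-- inner `while index < len(raw_argv) and not str(raw_argv[index]).startswith("-")`
def pvSymSkip (argv : List String) (i : Nat) : Nat :=
  if i < argv.length ∧ ¬ (PySem.Str.startswith argv[i]! "-") then pvSymSkip argv (i + 1)
  else i
termination_by argv.length - i
decreasing_by omega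

theorem pvSymSkip_ge (argv : List String) (i : Nat) : i ≤ pvSymSkip argv i := by
  fun_induction pvSymSkip argv i with
  | case1 i h ih => omega
  | case2 i h => omega

def pvALoop (argv : List String) (index : Nat) (stripped : List String) : List String :=
  if index < argv.length then
    let arg := argv[index]!
    if arg ∈ pvModeFlags then pvALoop argv (index + 1) stripped
    else if arg ∈ pvValueFlags then pvALoop argv (index + 2) stripped
    else if arg = "--symbols" then pvALoop argv (pvSymSkip argv (index + 1)) stripped
    else pvALoop argv (index + 1) (stripped ++ [arg])
  else stripped
termination_by argv.length - index
decreasing_by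
  · omega
  · omega
  · have := pvSymSkip_ge argv (index + 1); omega
  · omega

def diagnose_follow_up_base_argv_py (raw_argv : Option (List String)) : List String :=
  match raw_argv with
  | none => []
  | some argv => if argv = [] then [] else pvALoop argv 0 []

-- ===== PORT B =====
def pvBLoop : List String → Int → Bool → List String → List String
  | [], _, _, stripped => stripped
  | arg :: rest, skip_next, skipping_symbols, stripped =>
    if skip_next ≠ 0 then pvBLoop rest (skip_next - 1) skipping_symbols stripped
    else if skipping_symbols ∧ ¬ (PySem.Str.startswith arg "-") then
      pvBLoop rest skip_next skipping_symbols stripped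
    else
      -- skipping_symbols is cleared here (each branch continues with false)
      if arg ∈ pvModeFlags then pvBLoop rest skip_next false stripped
      else if arg ∈ pvValueFlags then pvBLoop rest 1 false stripped
      else if arg = "--symbols" then pvBLoop rest skip_next true stripped
      else pvBLoop rest skip_next false (stripped ++ [arg])

def diagnose_follow_up_base_argv_py_alt (raw_argv : Option (List String)) : List String :=
  match raw_argv with
  | none => []
  | some argv => if argv = [] then [] else pvBLoop argv 0 false []

-- ===== PRECONDITION & SPEC =====
def Spec_diagnose_follow_up_base_argv_py (raw_argv : Option (List String)) (out : List String) : Prop := out = diagnose_follow_up_base_argv_py_alt raw_argv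
instance (raw_argv : Option (List String)) (out : List String) : Decidable (Spec_diagnose_follow_up_base_argv_py raw_argv out) := by unfold Spec_diagnose_follow_up_base_argv_py; infer_instance

-- ===== CLAIM (what is proved, stated in full; the proofs are below) =====
def Claim_equal_diagnose_follow_up_base_argv_py : Prop := ∀ (raw_argv : Option (List String)), Dom_diagnose_follow_up_base_argv_py raw_argv → Spec_diagnose_follow_up_base_argv_py raw_argv (diagnose_follow_up_base_argv_py raw_argv)

-- ===== LEMMAS AND PROOFS =====

theorem pvDrop_cons (argv : List String) (i : Nat) (h : i < argv.length) :
    argv.drop i = argv[i]! :: argv.drop (i + 1) := by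
  have : argv[i]! = argv[i] := getElem!_pos argv i h
  rw [this]
  exact List.drop_eq_getElem_cons h

-- one step of pvBLoop at skip_next = 0 when the sym state is inert
-- (either off, or the head starts with "-")
theorem pvBLoop_classify (arg : String) (rest acc : List String) (b : Bool)
    (hb : b = false ∨ PySem.Str.startswith arg "-") :
    pvBLoop (arg :: rest) 0 b acc =
      if arg ∈ pvModeFlags then pvBLoop rest 0 false acc
      else if arg ∈ pvValueFlags then pvBLoop rest 1 false acc
      else if arg = "--symbols" then pvBLoop rest 0 true acc
      else pvBLoop rest 0 false (acc ++ [arg]) := by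
  cases b with
  | false => simp only [pvBLoop]; rw [if_neg (by norm_num), if_neg (by simp)]
  | true =>
    have hst : PySem.Str.startswith arg "-" = true := by
      rcases hb with hb | hb
      · exact absurd hb (by simp)
      · exact hb
    simp only [pvBLoop]
    rw [if_neg (by norm_num), if_neg (fun hh => hh.2 hst)]

-- while skipping symbols, B reaches the same suspension point as A's inner while
theorem pvBLoop_sym (argv : List String) (i : Nat) (acc : List String) :
    pvBLoop (argv.drop i) 0 true acc = pvBLoop (argv.drop (pvSymSkip argv i)) 0 true acc := by
  fun_induction pvSymSkip argv i with
  | case1 i h ih =>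
    rw [pvDrop_cons argv i h.1, ← ih]
    simp only [pvBLoop]
    rw [if_neg (by norm_num), if_pos ⟨by trivial, h.2⟩]
  | case2 i h => rfl

-- the suspension point: end of list, or an element starting with "-"
theorem pvSymSkip_stop (argv : List String) (i : Nat) :
    argv.drop (pvSymSkip argv i) = [] ∨
      ∃ a r, argv.drop (pvSymSkip argv i) = a :: r ∧ PySem.Str.startswith a "-" := by
  fun_induction pvSymSkip argv i with
  | case1 i h ih => exact ih
  | case2 i h =>
    by_cases hi : i < argv.length
    · right
      refine ⟨argv[i]!, argv.drop (i + 1), pvDrop_cons argv i hi, ?_⟩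
      by_contra hc
      exact h ⟨hi, hc⟩
    · left; exact List.drop_eq_nil_of_le (by omega)

-- at the suspension point the sym flag is inert
theorem pvBLoop_sym_off (l : List String) (acc : List String)
    (h : l = [] ∨ ∃ a r, l = a :: r ∧ PySem.Str.startswith a "-") :
    pvBLoop l 0 true acc = pvBLoop l 0 false acc := by
  rcases h with h | ⟨a, r, rfl, hs⟩
  · subst h; rfl
  · rw [pvBLoop_classify a r acc true (Or.inr hs), pvBLoop_classify a r acc false (Or.inl rfl)]

theorem pvMain (argv : List String) (index : Nat) (acc : List String) :
    pvALoop argv index acc = pvBLoop (argv.drop index) 0 false acc := by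
  fun_induction pvALoop argv index acc with
  | case1 index acc h arg hm ih =>
    rw [pvDrop_cons argv index h, pvBLoop_classify _ _ _ false (Or.inl rfl), if_pos hm]
    exact ih
  | case2 index acc h arg hm hv ih =>
    rw [pvDrop_cons argv index h, pvBLoop_classify _ _ _ false (Or.inl rfl),
        if_neg hm, if_pos hv]
    by_cases h1 : index + 1 < argv.length
    · rw [pvDrop_cons argv (index + 1) h1]
      simp only [pvBLoop]
      rw [if_pos (by norm_num)]
      norm_num
      exact ih
    · have e1 : argv.drop (index + 1) = [] := List.drop_eq_nil_of_le (by omega)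
      have e2 : argv.drop (index + 2) = [] := List.drop_eq_nil_of_le (by omega)
      rw [e1, ih, e2]
      rfl
  | case3 index acc h arg hm hv hs ih =>
    rw [pvDrop_cons argv index h, pvBLoop_classify _ _ _ false (Or.inl rfl),
        if_neg hm, if_neg hv, if_pos hs,
        pvBLoop_sym argv (index + 1) acc,
        pvBLoop_sym_off _ acc (pvSymSkip_stop argv (index + 1))]
    exact ih
  | case4 index acc h arg hm hv hs ih =>
    rw [pvDrop_cons argv index h, pvBLoop_classify _ _ _ false (Or.inl rfl),
        if_neg hm, if_neg hv, if_neg hs]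
    exact ih
  | case5 index acc h =>
    rw [List.drop_eq_nil_of_le (by omega)]
    rfl

-- ===== VERDICT (by name: the statement is the Claim_ definition above) =====
theorem diagnose_follow_up_base_argv_py_spec : Claim_equal_diagnose_follow_up_base_argv_py := by
  intro raw_argv _
  unfold Spec_diagnose_follow_up_base_argv_py diagnose_follow_up_base_argv_py diagnose_follow_up_base_argv_py_alt
  match raw_argv with
  | none => rfl
  | some argv =>
    by_cases h : argv = []
    · simp [h]
    · simp only [if_neg h]
      simpa using pvMain argv 0 []
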